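/- GENERATED by farm/mkstatement.py from design/units.tsv (unit `DGifSlurp.8`) and the assertions of Gif/Spec/Seg_DGifSlurp.lean — do not edit.
   THE STATEMENT of the proof unit `DGifSlurp.8`: segment 8 of `DGifSlurp` (26 instructions; entries 0x10a96a;
   exits 0x10a96a,0x10a948,0x10a8ed; ranges 0x10a96a-0x10a9c0,0x10a932-0x10a942)
   takes each of its entry assertions to one of its exit assertions (`Gif.Spec.DGifSlurp.Seg8`), given the contracts of its callees.
   What the names mean: ProgX/Base/Spec/Basic.lean (the shared hypotheses), Gif/Spec/Seg_DGifSlurp.lean (the assertions). The theorem to prove: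
   `theorem DGifSlurp_8_ok : Gif.Spec.DGifSlurp_8.Statement`. -/
import Gif.Code
import Gif.Dec.All
import Gif.Labels
import Gif.Spec.Lzw
import Gif.Spec.Seg_DGifSlurp
import Gif.Spec.Slurp
namespace Gif.Spec.DGifSlurp_8
open X86 X86.User Asan

/-- The statement of unit `DGifSlurp.8`. -/
def Statement : Prop :=
  ∀ (Lay : Layout) (_hLay : Lay.hi = 0x1000000) (μ : Microarch) (_hμ : UserX.MicroOK μ) (u₀ : State)
    (_hcode : HasCodeNat Lay u₀ Gif.L.DGifSlurp.entry Gif.Code.code_DGifSlurp.nat Gif.L.DGifSlurp.size)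
    (_h_asan_load4_noabort : Asan.SmallCheck Lay μ ProgX.Base.WayInv (ProgX.Base.CodeOK u₀) [.rax, .rcx, .rdx] 4 ProgX.Base.L.__asan_load4_noabort.entry)
    (_h_DGifGetLine : ∀ (H : Heap) (rest : List Obj) (frames : List (Nat × FrameLayout)) (F : Forest) (R : Rd) (n : Nat), Calls Lay μ ProgX.Base.WayInv (ProgX.Base.conv u₀) Gif.L.DGifGetLine.entry (Gif.Spec.DGifGetLine.spec H rest frames F R n))
    (_h_DGifDecreaseImageCounter : ∀ (H : Heap) (rest : List Obj) (frames : List (Nat × FrameLayout)) (F : Forest) (R : Rd) (init : List Img) (g : Img), Calls Lay μ ProgX.Base.WayInv (ProgX.Base.conv u₀) Gif.L.DGifDecreaseImageCounter.entry (Gif.Spec.DGifDecreaseImageCounter.spec H rest frames F R init g)),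
    Gif.Spec.DGifSlurp.Seg8 Lay μ u₀

end Gif.Spec.DGifSlurp_8
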